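-- pv_equiv track=rewrite | github.com/Pangpyo/TIL | programmers/kakaointern5.py | solution
-- ===== SOURCE A (Python) =====
-- def solution(n, tops):
--     answer = 0
--     S = [[1, 0] for _ in range(2*n+1)]
--     for i in range(n): # 위에 삼각형 있는경우 채우기
--         S[1+2*i][1] = tops[i]
--
--     D = [[0, 0] for _ in range(2*n+1)]
--     D[0][0] = 1 # [i][0] 채운경우 [i][1] 안채운경우
--     D[0][1] = 1
--     mod = 10007
--     for i in range(1, 2*n+1) :
--         D[i][0] = D[i-1][0] + D[i-1][1] # 1개, 가로 2개짜리 채우기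
--         D[i][1] = D[i-1][0] # 2개짜리 채우기
--         if S[i][1] : # 상단 공간이 있는 경우 세로 2개짜리 채우기
--             D[i][0] += D[i-1][0]
--         D[i][0] %= mod
--         D[i][1] %= mod
--     answer = D[-1][0]
--     return answer
-- ===== SOURCE B (Python) =====
-- def solution(n, tops):
--     # Column-wise two-scalar recurrence: eliminates the D table and S array.
--     # Invariant at column boundary 2j: filled = D[2j][0], odd_prev = D[2j][1].
--     MOD = 10007
--     odd_prev, filled = 1, 1
--     for j in range(n):
--         t = tops[j]
--         odd = (filled + odd_prev + (filled if t else 0)) % MOD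
--         odd_prev, filled = odd, (odd + filled) % MOD
--     return filled
-- ===== Notes on version B (the rewrite author's own statement) =====
-- stated objective: faster
-- what changed: Replaced the preallocated S array and full (2n+1)-row DP table D by a single loop over range(n) carrying two scalars (D[2j][0], D[2j][1]) and processing each column's odd and even cell in one step: no list allocation or per-cell list indexing, O(1) space instead of O(n).
import Mathlib
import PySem

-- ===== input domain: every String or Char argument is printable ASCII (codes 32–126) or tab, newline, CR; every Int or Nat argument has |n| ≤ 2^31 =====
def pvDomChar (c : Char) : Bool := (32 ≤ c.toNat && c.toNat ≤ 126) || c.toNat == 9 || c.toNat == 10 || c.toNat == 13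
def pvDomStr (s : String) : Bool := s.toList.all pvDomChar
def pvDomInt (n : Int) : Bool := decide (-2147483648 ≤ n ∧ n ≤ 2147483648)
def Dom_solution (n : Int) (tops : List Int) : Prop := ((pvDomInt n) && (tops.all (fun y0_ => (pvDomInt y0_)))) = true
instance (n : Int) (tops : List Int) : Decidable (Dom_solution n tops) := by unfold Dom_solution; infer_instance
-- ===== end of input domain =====

-- B replaces A's S array and (2n+1)-row DP table by a two-scalar fold over tops (one step per column): O(1) space.

-- ===== PORT A =====
def solution (n : Int) (tops : List Int) : Int :=
  let S0 : List (Int × Int) := (PySem.List.pyRange 0 (2*n+1)).map (fun _ => (1, 0))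
  let S := (PySem.List.pyRange 0 n).foldl
    (fun S i =>
      let row := PySem.List.pyGetD S (1+2*i) (1, 0)
      PySem.List.pySetD S (1+2*i) (row.1, PySem.List.pyGetD tops i 0)) S0
  let D0 : List (Int × Int) := (PySem.List.pyRange 0 (2*n+1)).map (fun _ => (0, 0))
  let D1 := PySem.List.pySetD D0 0 (1, (PySem.List.pyGetD D0 0 (0, 0)).2)
  let D2 := PySem.List.pySetD D1 0 ((PySem.List.pyGetD D1 0 (0, 0)).1, 1)
  let mod := (10007 : Int)
  let D := (PySem.List.pyRange 1 (2*n+1)).foldl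
    (fun D i =>
      let prev := PySem.List.pyGetD D (i-1) (0, 0)
      let d0 := prev.1 + prev.2
      let d1 := prev.1
      let d0 := if (PySem.List.pyGetD S i (1, 0)).2 ≠ 0 then d0 + prev.1 else d0
      PySem.List.pySetD D i (PySem.Int.mod d0 mod, PySem.Int.mod d1 mod)) D2
  (PySem.List.pyGetD D (-1) (0, 0)).1

-- ===== PORT B =====
def solution_alt (n : Int) (tops : List Int) : Int :=
  let MOD := (10007 : Int)
  let st := (PySem.List.pyRange 0 n).foldl
    (fun (st : Int × Int) (j : Int) =>
      let t := PySem.List.pyGetD tops j 0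
      let odd := PySem.Int.mod (st.2 + st.1 + (if t ≠ 0 then st.2 else 0)) MOD
      (odd, PySem.Int.mod (odd + st.2) MOD)) (1, 1)
  st.2

-- ===== PRECONDITION & SPEC =====
-- Pre_ excludes exactly the inputs where Python A raises IndexError: negative n (empty table, D[0][0] fails)
-- and tops shorter than n (tops[i] fails).
def Pre_solution (n : Int) (tops : List Int) : Prop := 0 ≤ n ∧ n ≤ tops.length
instance (n : Int) (tops : List Int) : Decidable (Pre_solution n tops) := by unfold Pre_solution; infer_instance
def pvWitness_solution : Int × List Int := (2, [1, 0])

def Spec_solution (n : Int) (tops : List Int) (out : Int) : Prop := out = solution_alt n tops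
instance (n : Int) (tops : List Int) (out : Int) : Decidable (Spec_solution n tops out) := by unfold Spec_solution; infer_instance

-- ===== CLAIM (what is proved, stated in full; the proofs are below) =====
def Claim_equal_solution : Prop := ∀ (n : Int) (tops : List Int), Dom_solution n tops → Pre_solution n tops → Spec_solution n tops (solution n tops)

-- ===== LEMMAS AND PROOFS =====

-- S[i][1] as a function of the cell index i (0 outside odd cells).
def topAt (tops : List Int) (i : Nat) : Int :=
  if i % 2 = 1 then tops.getD ((i - 1) / 2) 0 else 0

-- the DP pair (D[k][0], D[k][1]) of A's recurrence, as a pure recursion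
def fg (tops : List Int) : Nat → Int × Int
  | 0 => (1, 1)
  | k+1 =>
    let p := fg tops k
    (PySem.Int.mod (p.1 + p.2 + (if topAt tops (k+1) ≠ 0 then p.1 else 0)) 10007,
     PySem.Int.mod p.1 10007)

theorem mod_mod_10007 (x : Int) :
    PySem.Int.mod (PySem.Int.mod x 10007) 10007 = PySem.Int.mod x 10007 := by
  rw [PySem.Int.mod_eq_emod_of_pos (by norm_num), PySem.Int.mod_eq_emod_of_pos (by norm_num),
    Int.emod_emod_of_dvd _ dvd_rfl]

theorem fg_norm (tops : List Int) (k : Nat) :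
    PySem.Int.mod (fg tops k).1 10007 = (fg tops k).1 := by
  cases k with
  | zero => show PySem.Int.mod 1 10007 = 1
            decide
  | succ k => simp only [fg]; exact mod_mod_10007 _

-- value of S[i][1] after the first k assignments
def gS (tops : List Int) (k i : Nat) : Int :=
  if i % 2 = 1 ∧ (i - 1) / 2 < k then tops.getD ((i - 1) / 2) 0 else 0

theorem set_map_range {b : Type} (f : Nat → b) (N a : Nat) (v : b) (ha : a < N) :
    ((List.range N).map f).set a v = (List.range N).map (fun i => if i = a then v else f i) := by
  apply List.ext_getElem
  · simp
  intro i h1 h2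
  simp only [List.getElem_set, List.getElem_map, List.getElem_range]
  simp only [List.length_set, List.length_map, List.length_range] at h1
  by_cases hia : i = a
  · subst hia; simp
  · simp [hia, Ne.symm hia]

theorem S_fold (tops : List Int) (m : Nat) :
    ∀ (k : Nat), k ≤ m →
    (PySem.List.pyRange 0 (k : Int)).foldl
      (fun S i =>
        let row := PySem.List.pyGetD S (1+2*i) (1, 0)
        PySem.List.pySetD S (1+2*i) (row.1, PySem.List.pyGetD tops i 0))
      ((PySem.List.pyRange 0 (2*(m : Int)+1)).map (fun _ => ((1 : Int), (0 : Int))))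
    = (List.range (2*m+1)).map (fun i => ((1 : Int), gS tops k i)) := by
  intro k
  induction k with
  | zero =>
    intro _
    rw [show PySem.List.pyRange 0 ((0 : Nat) : Int) = [] from by
          rw [PySem.List.pyRange_zero]; simp,
      List.foldl_nil,
      show (2*(m : Int)+1) = ((2*m+1 : Nat) : Int) from by push_cast; ring, PySem.List.pyRange_zero,
      Int.toNat_natCast, List.map_map]
    apply List.map_congr_left
    intro i _
    simp [gS]
  | succ k ih =>
    intro hk
    rw [show ((k+1 : Nat) : Int) = (k : Int) + 1 from by push_cast; ring,
      PySem.List.pyRange_one_succ_right (a := 0) (b := (k : Int)) (by positivity),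
      List.foldl_append, List.foldl_cons, List.foldl_nil, ih (by omega)]
    simp only []
    rw [show (1 + 2*(k : Int)) = ((1+2*k : Nat) : Int) from by push_cast; ring,
      PySem.List.pyGetD_natCast, PySem.List.getD_map_range _ _ _ _ (by omega),
      PySem.List.pyGetD_natCast tops k 0, PySem.List.pySetD_natCast,
      set_map_range _ _ _ _ (by omega)]
    apply List.map_congr_left
    intro i hi
    rw [List.mem_range] at hi
    by_cases hik : i = 1+2*k
    · subst hik
      rw [if_pos rfl]
      have : gS tops (k+1) (1+2*k) = tops.getD k 0 := by
        unfold gS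
        rw [if_pos ⟨by omega, by omega⟩]
        congr 1
        omega
      rw [this]
    · rw [if_neg hik]
      have : gS tops (k+1) i = gS tops k i := by
        unfold gS
        split_ifs with h1 h2 h3
        · congr 1
        · exfalso; omega
        · exfalso; omega
        · rfl
      rw [this]

theorem S_to_topAt (tops : List Int) (m : Nat) :
    (List.range (2*m+1)).map (fun i => ((1 : Int), gS tops m i))
    = (List.range (2*m+1)).map (fun i => ((1 : Int), topAt tops i)) := by
  apply List.map_congr_left
  intro i hi
  rw [List.mem_range] at hi
  unfold gS topAt
  by_cases h : i % 2 = 1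
  · rw [if_pos ⟨h, by omega⟩, if_pos h]
  · rw [if_neg (by tauto), if_neg h]

theorem D_fold (tops : List Int) (m : Nat) :
    ∀ (k : Nat), k ≤ 2*m →
    (PySem.List.pyRange 1 ((k : Int)+1)).foldl
      (fun D i =>
        let prev := PySem.List.pyGetD D (i-1) (0, 0)
        let d0 := prev.1 + prev.2
        let d1 := prev.1
        let d0 := if (PySem.List.pyGetD ((List.range (2*m+1)).map (fun i => ((1 : Int), topAt tops i))) i (1, 0)).2 ≠ 0 then d0 + prev.1 else d0
        PySem.List.pySetD D i (PySem.Int.mod d0 10007, PySem.Int.mod d1 10007))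
      ((List.range (2*m+1)).map (fun i => if i ≤ 0 then fg tops i else ((0 : Int), (0 : Int))))
    = (List.range (2*m+1)).map (fun i => if i ≤ k then fg tops i else ((0 : Int), (0 : Int))) := by
  intro k
  induction k with
  | zero =>
    intro _
    rw [show ((0 : Nat) : Int) + 1 = (1 : Int) from by norm_num]
    rw [show PySem.List.pyRange 1 1 = [] from by rw [PySem.List.pyRange_one]; simp]
    rfl
  | succ k ih =>
    intro hk
    rw [show ((k+1 : Nat) : Int) + 1 = ((k : Int) + 1) + 1 from by push_cast; ring,
      PySem.List.pyRange_one_succ_right (a := 1) (b := (k : Int) + 1) (by omega),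
      List.foldl_append, List.foldl_cons, List.foldl_nil, ih (by omega)]
    simp only []
    rw [show ((k : Int) + 1 - 1) = ((k : Nat) : Int) from by ring,
      PySem.List.pyGetD_natCast, PySem.List.getD_map_range _ _ _ _ (by omega),
      show ((k : Int) + 1) = ((k+1 : Nat) : Int) from by push_cast; ring,
      PySem.List.pyGetD_natCast, PySem.List.getD_map_range _ _ _ _ (by omega),
      PySem.List.pySetD_natCast, set_map_range _ _ _ _ (by omega)]
    rw [if_pos (Nat.le_refl k)]
    apply List.map_congr_left
    intro i hi
    rw [List.mem_range] at hi
    by_cases hik : i = k+1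
    · subst hik
      rw [if_pos rfl, if_pos (Nat.le_refl (k+1))]
      simp only [fg]
      by_cases h : topAt tops (k+1) = 0 <;> simp [h]
    · rw [if_neg hik]
      by_cases hle : i ≤ k
      · rw [if_pos hle, if_pos (by omega)]
      · rw [if_neg hle, if_neg (by omega)]

theorem fgA_eq (tops : List Int) (m : Nat) :
    solution (m : Int) tops = (fg tops (2 * m)).1 := by
  unfold solution
  simp only []
  rw [S_fold tops m m (le_refl m), S_to_topAt]
  rw [show (2*(m : Int)+1) = ((2*m+1 : Nat) : Int) from by push_cast; ring,
    PySem.List.pyRange_zero, Int.toNat_natCast, List.map_map]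
  rw [show ((fun (_ : Int) => ((0 : Int), (0 : Int))) ∘ (fun (k : Nat) => (k : Int)))
      = (fun (_ : Nat) => ((0 : Int), (0 : Int))) from rfl]
  rw [PySem.List.pyGetD_zero, PySem.List.getD_map_range _ _ _ _ (by omega),
    show (((0 : Int), (0 : Int)) : Int × Int).2 = (0 : Int) from rfl]
  rw [PySem.List.pySetD_of_nonneg ((List.range (2*m+1)).map (fun _ => ((0 : Int), (0 : Int))))
        (((1 : Int), (0 : Int))) (by norm_num),
    show (0 : Int).toNat = 0 from rfl,
    set_map_range (fun _ => ((0 : Int), (0 : Int))) (2*m+1) 0 (((1 : Int), (0 : Int))) (by omega)]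
  rw [PySem.List.pyGetD_zero, PySem.List.getD_map_range _ _ _ _ (by omega), if_pos rfl,
    show (((1 : Int), (0 : Int)) : Int × Int).1 = (1 : Int) from rfl]
  rw [PySem.List.pySetD_of_nonneg _ _ (by norm_num), show (0 : Int).toNat = 0 from rfl,
    set_map_range _ _ _ _ (by omega)]
  rw [show (fun i => if i = 0 then ((1 : Int), (1 : Int)) else if i = 0 then ((1 : Int), (0 : Int)) else ((0 : Int), (0 : Int)))
      = (fun i => if i ≤ 0 then fg tops i else ((0 : Int), (0 : Int))) from by
    funext i
    by_cases h : i = 0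
    · subst h; rfl
    · simp [h, not_le.mpr (Nat.pos_of_ne_zero h)]]
  rw [show (((2*m+1 : Nat) : Int)) = ((2*m : Nat) : Int) + 1 from by push_cast; ring,
    D_fold tops m (2*m) (le_refl _)]
  have hne : (List.range (2*m+1)).map (fun i => if i ≤ 2*m then fg tops i else ((0 : Int), (0 : Int))) ≠ [] := by
    simp
  rw [PySem.List.pyGetD_neg_one _ _ hne, List.getLast_eq_getElem]
  simp only [List.length_map, List.length_range, List.getElem_map, List.getElem_range]
  rw [if_pos (by omega), show 2*m+1-1 = 2*m from by omega]

theorem topAt_odd (tops : List Int) (j : Nat) :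
    topAt tops (2 * j + 1) = tops.getD j 0 := by
  unfold topAt
  rw [if_pos (by omega)]
  congr 1
  omega

theorem topAt_even (tops : List Int) (j : Nat) :
    topAt tops (2 * j + 2) = 0 := by
  unfold topAt
  rw [if_neg (by omega)]

theorem bStep (tops : List Int) (j : Nat) (hj : j < tops.length) :
    ((PySem.Int.mod ((fg tops (2 * j)).1 + (fg tops (2 * j)).2 +
        (if tops[j] ≠ 0 then (fg tops (2 * j)).1 else 0)) 10007 : Int),
      (PySem.Int.mod (PySem.Int.mod ((fg tops (2 * j)).1 + (fg tops (2 * j)).2 +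
        (if tops[j] ≠ 0 then (fg tops (2 * j)).1 else 0)) 10007 + (fg tops (2 * j)).1) 10007 : Int))
    = ((fg tops (2 * j + 2)).2, (fg tops (2 * j + 2)).1) := by
  simp only [fg]
  rw [topAt_odd, topAt_even, List.getD_eq_getElem _ _ hj]
  simp only [mod_mod_10007, fg_norm]
  simp

theorem fgB_fold (tops : List Int) (m : Nat) (hm : m ≤ tops.length) :
    ∀ (k : Nat), k ≤ m →
    (PySem.List.pyRange 0 (k : Int)).foldl
      (fun (st : Int × Int) (j : Int) =>
        let t := PySem.List.pyGetD tops j 0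
        let odd := PySem.Int.mod (st.2 + st.1 + (if t ≠ 0 then st.2 else 0)) 10007
        (odd, PySem.Int.mod (odd + st.2) 10007))
      (1, 1)
    = ((fg tops (2 * k)).2, (fg tops (2 * k)).1) := by
  intro k
  induction k with
  | zero =>
    intro _
    rw [show PySem.List.pyRange 0 ((0 : Nat) : Int) = [] from by
          rw [PySem.List.pyRange_zero]; simp,
      List.foldl_nil]
    rfl
  | succ k ih =>
    intro hk
    rw [show ((k+1 : Nat) : Int) = (k : Int) + 1 from by push_cast; ring,
      PySem.List.pyRange_one_succ_right (a := 0) (b := (k : Int)) (by positivity),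
      List.foldl_append, List.foldl_cons, List.foldl_nil, ih (by omega)]
    simp only []
    rw [PySem.List.pyGetD_natCast tops k 0, List.getD_eq_getElem _ _ (show k < tops.length by omega)]
    rw [bStep tops k (by omega), show 2 * k + 2 = 2 * (k + 1) from by omega]

theorem fgB_eq (tops : List Int) (m : Nat) (hm : m ≤ tops.length) :
    solution_alt (m : Int) tops = (fg tops (2 * m)).1 := by
  unfold solution_alt
  simp only []
  rw [fgB_fold tops m hm m (le_refl m)]

-- ===== VERDICT (by name: the statement is the Claim_ definition above) =====
theorem solution_spec : Claim_equal_solution := by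
  intro n tops _ hpre
  obtain ⟨hn, hlen⟩ := hpre
  unfold Spec_solution
  obtain ⟨m, rfl⟩ : ∃ m : Nat, n = (m : Int) := ⟨n.toNat, (Int.toNat_of_nonneg hn).symm⟩
  have hm : m ≤ tops.length := by exact_mod_cast hlen
  rw [fgA_eq tops m, fgB_eq tops m hm]
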